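-- pv_equiv track=rewrite | github.com/Aadityaa2606/Problem-Of-The-Day | Python Code/22_3_22.py | stringformer
-- ===== SOURCE A (Python) =====
-- def stringformer(n):
--     S = ''
--     while n!=0:
--         r = n%3
--         q = n//3
--         n = q
--         if r == 0:
--             S+='r'
--         elif r == 1:
--             S+='g'
--         else:
--             S+='b'
--     S+='r'*(20-len(S))
--     return S[::-1]
-- ===== SOURCE B (Python) =====
-- def stringformer(n):
--     q = n
--     count = 0
--     while q != 0:
--         q //= 3
--         count += 1
--     L = max(count, 20)
--     return ''.join('rgb'[(n // 3**i) % 3] for i in range(L - 1, -1, -1))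
-- ===== Notes on version B (the rewrite author's own statement) =====
-- stated objective: alternative
-- what changed: B first counts the base-3 digits of n, then emits the padded string most-significant-digit-first by computing (n // 3**i) % 3 directly for each position, with no string mutation of n's remainder list and no final reversal.
import Mathlib
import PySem

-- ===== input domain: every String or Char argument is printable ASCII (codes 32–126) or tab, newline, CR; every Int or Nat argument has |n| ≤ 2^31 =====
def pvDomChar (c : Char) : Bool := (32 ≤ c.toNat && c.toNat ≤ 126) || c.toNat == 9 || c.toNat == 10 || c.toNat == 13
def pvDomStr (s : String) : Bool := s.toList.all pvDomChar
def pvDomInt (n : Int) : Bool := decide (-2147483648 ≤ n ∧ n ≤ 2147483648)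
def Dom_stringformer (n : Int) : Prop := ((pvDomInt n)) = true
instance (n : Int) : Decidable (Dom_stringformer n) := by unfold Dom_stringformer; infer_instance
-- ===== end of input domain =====

-- B emits the padded base-3 string most-significant-first via (n // 3**i) % 3, avoiding A's
-- append-then-reverse shape (objective: alternative decomposition, same cost).

-- ===== PORT A =====
-- A's while loop; the guard is written 0 < n because for n < 0 Python's loop never
-- terminates (n stays negative under n//3), and those inputs are outside Pre_.
-- The string S built by '+=' is carried as a List Char; S[::-1] is .reverse (exact for chars).
def stringformerLoop (n : Int) (S : List Char) : List Char :=
  if h : 0 < n then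
    let r := PySem.Int.mod n 3
    let q := PySem.Int.floordiv n 3
    stringformerLoop q (S ++ [if r = 0 then 'r' else if r = 1 then 'g' else 'b'])
  else S
termination_by n.toNat
decreasing_by
  rw [PySem.Int.floordiv_eq_ediv_of_pos (by omega : (0:Int) < 3)]; omega

def stringformer (n : Int) : String :=
  let S := stringformerLoop n []
  let S2 := S ++ List.replicate (20 - S.length) 'r'   -- 'r'*(20-len(S)): empty when len ≥ 20
  String.mk S2.reverse

-- ===== PORT B =====
-- B's digit-count loop; same 0 < q guard as A's loop (for q < 0 Python's loop diverges, outside Pre_).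
def countLoop (q : Int) (count : Nat) : Nat :=
  if h : 0 < q then countLoop (PySem.Int.floordiv q 3) (count + 1) else count
termination_by q.toNat
decreasing_by
  rw [PySem.Int.floordiv_eq_ediv_of_pos (by omega : (0:Int) < 3)]; omega

-- 'rgb'[d] for d = (n // 3**i) % 3; the if-chain is exact since mod _ 3 ∈ {0,1,2};
-- 3**i is ported as 3^i.toNat, exact for the nonnegative i produced by the range.
def digitChar (n : Int) (i : Int) : Char :=
  let d := PySem.Int.mod (PySem.Int.floordiv n ((3:Int) ^ i.toNat)) 3
  if d = 0 then 'r' else if d = 1 then 'g' else 'b'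

def stringformer_alt (n : Int) : String :=
  let count := countLoop n 0
  let L : Int := max (count : Int) 20
  String.mk ((PySem.List.pyRange (L - 1) (-1) (-1)).map (digitChar n))

-- ===== PRECONDITION & SPEC =====
-- Pre_ excludes n < 0, on which Python A's while loop never terminates (n//3 stays negative).
def Pre_stringformer (n : Int) : Prop := 0 ≤ n
instance (n : Int) : Decidable (Pre_stringformer n) := by unfold Pre_stringformer; infer_instance
def pvWitness_stringformer : Int := (5)

def Spec_stringformer (n : Int) (out : String) : Prop := out = stringformer_alt n
instance (n : Int) (out : String) : Decidable (Spec_stringformer n out) := by unfold Spec_stringformer; infer_instance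

-- ===== CLAIM (what is proved, stated in full; the proofs are below) =====
def Claim_equal_stringformer : Prop := ∀ (n : Int), Dom_stringformer n → Pre_stringformer n → Spec_stringformer n (stringformer n)

-- ===== LEMMAS AND PROOFS =====

-- proof-side: the base-3 digit characters of m, least significant first (Nat version of A's loop body)
def dchar (d : Nat) : Char := if d = 0 then 'r' else if d = 1 then 'g' else 'b'

def digsN (m : Nat) : List Char :=
  if h : m = 0 then [] else dchar (m % 3) :: digsN (m / 3)
termination_by m
decreasing_by exact Nat.div_lt_self (by omega) (by omega)

theorem digsN_zero : digsN 0 = [] := by rw [digsN]; simp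

theorem digsN_pos (m : Nat) (h : m ≠ 0) : digsN m = dchar (m % 3) :: digsN (m / 3) := by
  rw [digsN]; simp [h]

theorem loop_eq (m : Nat) : ∀ S : List Char, stringformerLoop (m : Int) S = S ++ digsN m := by
  induction m using Nat.strong_induction_on with
  | _ m ih =>
    intro S
    rw [stringformerLoop]
    by_cases h : m = 0
    · subst h; simp [digsN_zero]
    · have hpos : (0 : Int) < (m : Int) := by exact_mod_cast Nat.pos_of_ne_zero h
      have hfd : PySem.Int.floordiv ((m : Int)) 3 = ((m / 3 : Nat) : Int) := by
        exact_mod_cast PySem.Int.floordiv_natCast m 3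
      have hmd : PySem.Int.mod ((m : Int)) 3 = ((m % 3 : Nat) : Int) := by
        exact_mod_cast PySem.Int.mod_natCast m 3
      simp only [hpos, dif_pos, hfd, hmd]
      rw [ih (m / 3) (Nat.div_lt_self (Nat.pos_of_ne_zero h) (by omega)) _]
      rw [digsN_pos m h]
      have hc : (if ((m % 3 : Nat) : Int) = 0 then 'r' else if ((m % 3 : Nat) : Int) = 1 then 'g' else 'b')
          = dchar (m % 3) := by
        unfold dchar
        simp only [Nat.cast_eq_zero, Nat.cast_eq_one]
      rw [hc]; simp

theorem count_eq (m : Nat) : ∀ c : Nat, countLoop (m : Int) c = c + (digsN m).length := by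
  induction m using Nat.strong_induction_on with
  | _ m ih =>
    intro c
    rw [countLoop]
    by_cases h : m = 0
    · subst h; simp [digsN_zero]
    · have hpos : (0 : Int) < (m : Int) := by exact_mod_cast Nat.pos_of_ne_zero h
      have hfd : PySem.Int.floordiv ((m : Int)) 3 = ((m / 3 : Nat) : Int) := by
        exact_mod_cast PySem.Int.floordiv_natCast m 3
      simp only [hpos, dif_pos, hfd]
      rw [ih (m / 3) (Nat.div_lt_self (Nat.pos_of_ne_zero h) (by omega)) _]
      rw [digsN_pos m h]
      simp; omega

theorem digsN_len (k : Nat) : ∀ m : Nat, m < 3 ^ k → (digsN m).length ≤ k := by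
  induction k with
  | zero => intro m hm; interval_cases m; simp [digsN_zero]
  | succ k ih =>
    intro m hm
    by_cases h : m = 0
    · subst h; simp [digsN_zero]
    · rw [digsN_pos m h]
      have h3 : m / 3 < 3 ^ k := by
        have h := hm; rw [pow_succ] at h; omega
      simpa using ih (m / 3) h3

-- key invariant: the k most-significant-first digit chars of m equal the 'r'-padding
-- followed by the reversed LSB-first digit list, whenever m < 3^k
theorem key (k : Nat) : ∀ m : Nat, m < 3 ^ k →
    (List.range k).map (fun j => dchar (m / 3 ^ (k - 1 - j) % 3))
      = List.replicate (k - (digsN m).length) 'r' ++ (digsN m).reverse := by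
  induction k with
  | zero => intro m hm; interval_cases m; simp [digsN_zero]
  | succ k ih =>
    intro m hm
    rw [List.range_succ, List.map_append]
    have hstep : (List.range k).map (fun j => dchar (m / 3 ^ (k + 1 - 1 - j) % 3))
        = (List.range k).map (fun j => dchar ((m / 3) / 3 ^ (k - 1 - j) % 3)) := by
      apply List.map_congr_left
      intro j hj
      have hjk : j < k := List.mem_range.mp hj
      have h1 : k + 1 - 1 - j = (k - 1 - j) + 1 := by omega
      rw [h1, Nat.div_div_eq_div_mul, pow_succ]
      ring_nf
    have hm3 : m / 3 < 3 ^ k := by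
      have h := hm; rw [pow_succ] at h; omega
    rw [hstep, ih (m / 3) hm3]
    by_cases h : m = 0
    · subst h
      simp [digsN_zero, dchar, List.replicate_succ' (n := k)]
    · rw [digsN_pos m h]
      have hlen : (digsN (m / 3)).length ≤ k := digsN_len k (m / 3) hm3
      simp only [List.map_cons, List.map_nil, List.reverse_cons, List.length_cons]
      have hsub : k + 1 - ((digsN (m / 3)).length + 1) = k - (digsN (m / 3)).length := by omega
      rw [hsub]
      simp

theorem stringformer_eq_lists (n : Int) (hdom : Dom_stringformer n) (hpre : Pre_stringformer n) :
    stringformer n = stringformer_alt n := by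
  unfold Pre_stringformer at hpre
  lift n to Nat using hpre with m
  have hdomm : m < 3 ^ 20 := by
    unfold Dom_stringformer pvDomInt at hdom
    simp only [decide_eq_true_eq] at hdom
    have : (m : Int) ≤ 2147483648 := hdom.2
    have : m ≤ 2147483648 := by exact_mod_cast this
    omega
  have hlen : (digsN m).length ≤ 20 := digsN_len 20 m hdomm
  -- A side
  unfold stringformer
  rw [loop_eq m []]
  simp only [List.nil_append]
  -- B side
  unfold stringformer_alt
  rw [count_eq m 0]
  simp only [Nat.zero_add]
  have hmax : max (((digsN m).length : Int)) 20 = 20 :=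
    max_eq_right (by exact_mod_cast hlen)
  rw [hmax]
  have hrange : PySem.List.pyRange ((20 : Int) - 1) (-1) (-1)
      = (List.range 20).map (fun k : Nat => (19 : Int) - (k : Int)) := by
    rw [show ((20 : Int) - 1) = 19 by norm_num, PySem.List.pyRange_neg_one]
    norm_num
    rfl
  congr 1
  rw [List.reverse_append, List.reverse_replicate, hrange, List.map_map]
  rw [← key 20 m hdomm]
  apply List.map_congr_left
  intro j hj
  have hjk : j < 20 := List.mem_range.mp hj
  show dchar (m / 3 ^ (20 - 1 - j) % 3) = digitChar (m : Int) ((19 : Int) - (j : Int))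
  unfold digitChar dchar
  have ht : ((19 : Int) - (j : Int)).toNat = 19 - j := by omega
  rw [ht]
  have hp : ((3 : Int) ^ (19 - j)) = (((3 ^ (19 - j) : Nat)) : Int) := by push_cast; ring
  rw [hp]
  have hfd : PySem.Int.floordiv ((m : Int)) ((3 ^ (19 - j) : Nat) : Int)
      = ((m / 3 ^ (19 - j) : Nat) : Int) := PySem.Int.floordiv_natCast m _
  have hmd : PySem.Int.mod (((m / 3 ^ (19 - j) : Nat)) : Int) 3
      = ((m / 3 ^ (19 - j) % 3 : Nat) : Int) := by
    exact_mod_cast PySem.Int.mod_natCast (m / 3 ^ (19 - j)) 3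
  rw [hfd, hmd]
  have h191 : 20 - 1 - j = 19 - j := by omega
  rw [h191]
  simp only [Nat.cast_eq_zero, Nat.cast_eq_one]

-- ===== VERDICT (by name: the statement is the Claim_ definition above) =====
theorem stringformer_spec : Claim_equal_stringformer := by
  intro n hdom hpre
  unfold Spec_stringformer
  exact stringformer_eq_lists n hdom hpre
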